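-- pv_equiv track=rewrite | github.com/iboudaouara/zarr-mycodec | share/my_codec.py | _shape_to_nijk
-- ===== SOURCE A (Python) =====
-- def _shape_to_nijk(shape: tuple[int, ...]) -> tuple[int, int, int]:
--     ndim = len(shape)
--     if ndim == 1:
--         return shape[0], 1, 1
--     if ndim == 2:
--         return shape[0], shape[1], 1
--     if ndim == 3:
--         return shape[0], shape[1], shape[2]
--     ni = 1
--     for s in shape[:-2]:
--         ni *= s
--     return ni, shape[-2], shape[-1]
-- ===== SOURCE B (Python) =====
-- def _shape_to_nijk(shape: tuple[int, ...]) -> tuple[int, int, int]: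
--     # Normalize the shape to exactly 3 dims on an explicit stack held in reverse
--     # (so the leading dims sit at the top): pad with trailing 1s while too short,
--     # then repeatedly merge the two leading dims into their product while too long.
--     work = list(shape)
--     work.reverse()
--     while len(work) < 3:
--         work.insert(0, 1)
--     while len(work) > 3:
--         a = work.pop()
--         b = work.pop()
--         work.append(a * b)
--     return work[2], work[1], work[0]
-- ===== Notes on version B (the rewrite author's own statement) =====
-- stated objective: alternative
-- what changed: B replaces A's per-ndim branch ladder with its one product scan by normalizing an explicit reversed work stack to exactly 3 entries: push trailing 1s while too short, then repeatedly pop the two leading dims and push their product while too long.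
import Mathlib
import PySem

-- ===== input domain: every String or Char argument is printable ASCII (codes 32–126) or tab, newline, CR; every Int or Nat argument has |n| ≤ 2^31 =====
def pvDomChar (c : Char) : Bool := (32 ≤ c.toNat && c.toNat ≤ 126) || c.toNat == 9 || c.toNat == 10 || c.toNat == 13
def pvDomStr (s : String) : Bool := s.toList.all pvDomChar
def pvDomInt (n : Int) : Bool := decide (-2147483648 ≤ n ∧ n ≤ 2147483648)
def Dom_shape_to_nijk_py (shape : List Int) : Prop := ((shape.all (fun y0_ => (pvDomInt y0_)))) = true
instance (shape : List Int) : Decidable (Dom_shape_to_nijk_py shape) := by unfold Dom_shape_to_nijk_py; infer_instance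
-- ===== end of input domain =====

-- B replaces A's branch ladder + product loop by normalizing an explicit stack of dims
-- to exactly 3 entries (pad with 1s / merge the two leading dims); return-value
-- equivalence is proved on nonempty shapes (A raises on the empty one).

-- ===== PORT A =====
def shape_to_nijk_py (shape : List Int) : Int × Int × Int :=
  let ndim : Int := shape.length
  if ndim = 1 then ((PySem.List.pyGet? shape 0).getD 0, 1, 1)
  else if ndim = 2 then ((PySem.List.pyGet? shape 0).getD 0, (PySem.List.pyGet? shape 1).getD 0, 1)
  else if ndim = 3 then ((PySem.List.pyGet? shape 0).getD 0, (PySem.List.pyGet? shape 1).getD 0, (PySem.List.pyGet? shape 2).getD 0)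
  else
    let ni := (PySem.List.slice shape none (some (-2))).foldl (fun acc s => acc * s) 1
    (ni, (PySem.List.pyGet? shape (-2)).getD 0, (PySem.List.pyGet? shape (-1)).getD 0)

-- ===== PORT B =====
-- Python's `work` list is kept REVERSED (its top / pop()-end is the leading dim), so it
-- is modeled here by its reverse `v = work[::-1]`, i.e. the shape in original order:
-- Python's pop();pop();append(a*b) is `a :: b :: rest ↦ (a*b) :: rest` on `v`, Python's
-- insert(0, 1) is `v ++ [1]`, and (work[2], work[1], work[0]) is (v[0], v[1], v[2]).
-- Each while loop becomes a recursion with a fuel argument as a pure totality guard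
-- (3 pads at most; one merge per element, so `length` fuel suffices).
def shape_to_nijk_py_pad : Nat → List Int → List Int
  | Nat.succ f, v => if v.length < 3 then shape_to_nijk_py_pad f (v ++ [1]) else v
  | 0, v => v

def shape_to_nijk_py_merge : Nat → List Int → List Int
  | Nat.succ f, v =>
    if v.length > 3 then
      match v with
      | a :: b :: rest => shape_to_nijk_py_merge f ((a * b) :: rest)
      | _ => v
    else v
  | 0, v => v

def shape_to_nijk_py_alt (shape : List Int) : Int × Int × Int :=
  let v := shape_to_nijk_py_pad 3 shape
  let v := shape_to_nijk_py_merge v.length v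
  ((PySem.List.pyGet? v 0).getD 0, (PySem.List.pyGet? v 1).getD 0, (PySem.List.pyGet? v 2).getD 0)

-- ===== PRECONDITION & SPEC =====
-- Pre_ excludes only the empty shape, on which Python A raises IndexError (shape[-2]).
def Pre_shape_to_nijk_py (shape : List Int) : Prop := shape ≠ []
instance (shape : List Int) : Decidable (Pre_shape_to_nijk_py shape) := by unfold Pre_shape_to_nijk_py; infer_instance
def pvWitness_shape_to_nijk_py : List Int := [4, 5]

def Spec_shape_to_nijk_py (shape : List Int) (out : Int × Int × Int) : Prop := out = shape_to_nijk_py_alt shape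
instance (shape : List Int) (out : Int × Int × Int) : Decidable (Spec_shape_to_nijk_py shape out) := by unfold Spec_shape_to_nijk_py; infer_instance

-- ===== CLAIM (what is proved, stated in full; the proofs are below) =====
def Claim_equal_shape_to_nijk_py : Prop := ∀ (shape : List Int), Dom_shape_to_nijk_py shape → Pre_shape_to_nijk_py shape → Spec_shape_to_nijk_py shape (shape_to_nijk_py shape)

-- ===== LEMMAS AND PROOFS =====

theorem pv_pg0 (x : Int) (xs : List Int) : (PySem.List.pyGet? (x :: xs) 0).getD 0 = x := by
  simp [PySem.List.pyGet?, PySem.List.pyIdx?]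

theorem pv_pg1 (x y : Int) (xs : List Int) : (PySem.List.pyGet? (x :: y :: xs) 1).getD 0 = y := by
  simp [PySem.List.pyGet?, PySem.List.pyIdx?]

theorem pv_pg2 (x y z : Int) (xs : List Int) : (PySem.List.pyGet? (x :: y :: z :: xs) 2).getD 0 = z := by
  have h := PySem.List.pyGet?_ofNat (x :: y :: z :: xs) 2 (by simp)
  simp at h
  simp [h]

-- The merge loop collapses the leading dims into their product, for any sufficient fuel.
theorem pv_merge_eq : ∀ (n : ℕ) (v : List Int), v.length = n + 3 → ∀ (f : ℕ), n ≤ f →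
    shape_to_nijk_py_merge f v = (v.take (n + 1)).prod :: v.drop (n + 1) := by
  intro n
  induction n with
  | zero =>
    rintro (_ | ⟨a, r⟩) h f _ <;> simp_all
    rcases f with _ | g
    · rw [shape_to_nijk_py_merge]
    · simp [shape_to_nijk_py_merge, h]
  | succ n ih =>
    rintro (_ | ⟨a, _ | ⟨b, r⟩⟩) h f hf <;> simp_all
    have hr : r.length = n + 2 := by omega
    obtain ⟨g, rfl⟩ : ∃ g, f = g + 1 := ⟨f - 1, by omega⟩
    rw [shape_to_nijk_py_merge, if_pos (by simp; omega)]
    rw [ih (a * b :: r) (by simp [hr]) g (by omega)]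
    simp [List.take_succ_cons, List.prod_cons, mul_assoc]
    rw [← List.prod_take_succ _ n (by simp; omega)]
    simp [List.take_succ_cons, mul_assoc]

-- On shapes with at least 3 dims, B computes (prod of leading dims, 2nd-last, last).
theorem pv_alt_eq (n : ℕ) (l : List Int) (h : l.length = n + 3) :
    shape_to_nijk_py_alt l = ((l.take (n + 1)).prod, (l[n + 1]?).getD 0, (l[n + 2]?).getD 0) := by
  have hpad : shape_to_nijk_py_pad 3 l = l := by
    simp [shape_to_nijk_py_pad, h]
  rw [shape_to_nijk_py_alt]
  simp only [hpad]
  rw [pv_merge_eq n l h l.length (by omega)]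
  have hlen2 : (l.drop (n + 1)).length = 2 := by simp [h]
  obtain ⟨x, y, hxy⟩ := List.length_eq_two.mp hlen2
  have hx : l[n + 1]? = some x := by
    have h0 : (l.drop (n + 1))[0]? = some x := by rw [hxy]; rfl
    rw [List.getElem?_drop] at h0
    simpa using h0
  have hy : l[n + 2]? = some y := by
    have h0 : (l.drop (n + 1))[1]? = some y := by rw [hxy]; rfl
    rw [List.getElem?_drop] at h0
    simpa [show n + 1 + 1 = n + 2 from rfl] using h0
  rw [hxy, pv_pg0, pv_pg1, pv_pg2, hx, hy]
  simp

theorem pv_key (shape : List Int) (hpre : shape ≠ []) :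
    shape_to_nijk_py shape = shape_to_nijk_py_alt shape := by
  obtain ⟨a, s, rfl⟩ := List.exists_cons_of_ne_nil hpre
  rcases s with _ | ⟨b, _ | ⟨c, _ | ⟨d, t⟩⟩⟩
  · -- length 1: B pads twice, then reads off (a, 1, 1)
    simp [shape_to_nijk_py, shape_to_nijk_py_alt, shape_to_nijk_py_pad,
      shape_to_nijk_py_merge, PySem.List.pyGet?, PySem.List.pyIdx?]
  · -- length 2: B pads once
    simp [shape_to_nijk_py, shape_to_nijk_py_alt, shape_to_nijk_py_pad,
      shape_to_nijk_py_merge, PySem.List.pyGet?, PySem.List.pyIdx?]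
  · -- length 3
    rw [pv_alt_eq 0 [a, b, c] (by simp)]
    simp [shape_to_nijk_py, pv_pg0, pv_pg1, pv_pg2]
  · -- length ≥ 4
    have hlen : (a :: b :: c :: d :: t).length = t.length + 4 := by simp
    rw [pv_alt_eq (t.length + 1) _ (by simp)]
    have h1 : ((a :: b :: c :: d :: t).length : Int) ≠ 1 := by push_cast [hlen]; omega
    have h2 : ((a :: b :: c :: d :: t).length : Int) ≠ 2 := by push_cast [hlen]; omega
    have h3 : ((a :: b :: c :: d :: t).length : Int) ≠ 3 := by push_cast [hlen]; omega
    rw [shape_to_nijk_py]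
    simp only [h1, h2, h3, if_false]
    rw [PySem.List.slice_to_neg_ofNat _ 2 (by norm_num)]
    rw [PySem.List.pyGet?_neg_ofNat _ 2 (by norm_num) (by simp)]
    rw [PySem.List.pyGet?_neg_ofNat _ 1 (by norm_num) (by simp)]
    refine congrArg₂ _ ?_ (congrArg₂ _ ?_ ?_)
    · have e : (a :: b :: c :: d :: t).length - 2 = t.length + 1 + 1 := by simp
      rw [e, List.prod_eq_foldl]
    · simp [hlen]
    · simp [hlen]

-- ===== VERDICT (by name: the statement is the Claim_ definition above) =====
theorem shape_to_nijk_py_spec : Claim_equal_shape_to_nijk_py := by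
  intro shape _ hpre
  exact pv_key shape hpre
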